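-- pv_equiv track=rewrite | github.com/NoorAlHadidi/Arabic-Diacritization | utils/dataset_builder.py | compute_sentence_word_indices
-- ===== SOURCE A (Python) =====
-- def compute_sentence_word_indices(letters):
--     '''
--     Computes word indices for each character in the input sequence (output of extract_letters_and_diacritics).
--     '''
--     word_indices = []
--     current_word_index = -1
--     in_word = False
--
--     for character in letters:
--         if character.isspace():
--             in_word = False
--             word_indices.append(-1) # space gets -1
--         else:
--             if not in_word:
--                 current_word_index += 1
--                 in_word = True
--             word_indices.append(current_word_index)
--
--     return word_indices
-- ===== SOURCE B (Python) =====
-- def compute_sentence_word_indices(letters):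
--     '''
--     Run-based reimplementation: scan maximal runs of whitespace / non-whitespace
--     and emit one value per character of each run (-1 for space runs, the next
--     word counter value for word runs).
--     '''
--     out = []
--     n = len(letters)
--     i = 0
--     w = -1
--     while i < n:
--         j = i
--         if letters[i].isspace():
--             while j < n and letters[j].isspace():
--                 j += 1
--             out.extend([-1] * (j - i))
--         else:
--             while j < n and not letters[j].isspace():
--                 j += 1
--             w += 1
--             out.extend([w] * (j - i))
--         i = j
--     return out
-- ===== Notes on version B (the rewrite author's own statement) =====
-- stated objective: alternative
-- what changed: Replaces the per-character state machine (in_word flag updated on every character) by a run-based scan that consumes each maximal whitespace/non-whitespace run at once and emits a block of equal indices per run.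
import Mathlib
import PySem

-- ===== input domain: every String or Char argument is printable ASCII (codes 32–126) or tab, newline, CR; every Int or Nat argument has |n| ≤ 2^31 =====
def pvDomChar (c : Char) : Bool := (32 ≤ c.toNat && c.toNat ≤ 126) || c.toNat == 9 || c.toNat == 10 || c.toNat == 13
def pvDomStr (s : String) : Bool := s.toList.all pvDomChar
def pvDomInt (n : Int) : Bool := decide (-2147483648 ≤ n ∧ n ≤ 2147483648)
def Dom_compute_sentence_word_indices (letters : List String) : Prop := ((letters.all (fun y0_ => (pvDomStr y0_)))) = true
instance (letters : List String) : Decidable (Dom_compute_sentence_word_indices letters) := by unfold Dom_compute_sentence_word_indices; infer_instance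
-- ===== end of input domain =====

-- B replaces A's per-character in_word state machine by a run-based scan emitting one block of equal indices per maximal run (alternative decomposition, same cost).


-- ===== PORT A =====
-- literal fold over the state (word_indices, current_word_index, in_word)
def compute_sentence_word_indices (letters : List String) : List Int :=
  (letters.foldl
    (fun (st : List Int × Int × Bool) character =>
      if PySem.Str.strIsspace character then
        (st.1 ++ [-1], st.2.1, false)
      else if !st.2.2 then
        (st.1 ++ [st.2.1 + 1], st.2.1 + 1, true)
      else
        (st.1 ++ [st.2.1], st.2.1, true))
    ([], -1, false)).1

-- ===== PORT B =====
-- run-based scan (Source B's outer while loop): consume a maximal run, emit a block, recurse on the rest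
def pvAltGo (w : Int) : List String → List Int
  | [] => []
  | c :: rest =>
    if PySem.Str.strIsspace c then
      List.replicate ((rest.takeWhile (fun s => PySem.Str.strIsspace s)).length + 1) (-1)
        ++ pvAltGo w (rest.dropWhile (fun s => PySem.Str.strIsspace s))
    else
      List.replicate ((rest.takeWhile (fun s => !PySem.Str.strIsspace s)).length + 1) (w + 1)
        ++ pvAltGo (w + 1) (rest.dropWhile (fun s => !PySem.Str.strIsspace s))
  termination_by xs => xs.length
  decreasing_by
    · exact Nat.lt_succ_of_le (rest.length_dropWhile_le _)
    · exact Nat.lt_succ_of_le (rest.length_dropWhile_le _)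

def compute_sentence_word_indices_alt (letters : List String) : List Int :=
  pvAltGo (-1) letters

-- ===== PRECONDITION & SPEC =====
def Spec_compute_sentence_word_indices (letters : List String) (out : List Int) : Prop := out = compute_sentence_word_indices_alt letters
instance (letters : List String) (out : List Int) : Decidable (Spec_compute_sentence_word_indices letters out) := by unfold Spec_compute_sentence_word_indices; infer_instance

-- ===== CLAIM (what is proved, stated in full; the proofs are below) =====
def Claim_equal_compute_sentence_word_indices : Prop := ∀ (letters : List String), Dom_compute_sentence_word_indices letters → Spec_compute_sentence_word_indices letters (compute_sentence_word_indices letters)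

-- ===== LEMMAS AND PROOFS =====

-- value emitted by B while inside a word whose index is w: w per remaining word char, then continue
def pvMidGo (w : Int) (xs : List String) : List Int :=
  List.replicate ((xs.takeWhile (fun s => !PySem.Str.strIsspace s)).length) w
    ++ pvAltGo w (xs.dropWhile (fun s => !PySem.Str.strIsspace s))

theorem pvAltGo_cons_space (c : String) (hc : PySem.Str.strIsspace c = true)
    (rest : List String) (w : Int) :
    pvAltGo w (c :: rest) = -1 :: pvAltGo w rest := by
  rw [pvAltGo, if_pos hc]
  cases rest with
  | nil => simp [pvAltGo]
  | cons d rs =>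
    by_cases hd : PySem.Str.strIsspace d = true
    · rw [List.takeWhile_cons_of_pos hd, List.dropWhile_cons_of_pos hd]
      rw [pvAltGo, if_pos hd]
      simp only [List.length_cons, List.replicate_succ, List.cons_append]
    · simp only [Bool.not_eq_true] at hd
      rw [List.takeWhile_cons_of_neg (by simpa [PySem.Str.strIsspace] using hd),
          List.dropWhile_cons_of_neg (by simpa [PySem.Str.strIsspace] using hd)]
      simp [List.replicate_succ]

theorem pvAltGo_cons_word (c : String) (hc : PySem.Str.strIsspace c = false)
    (rest : List String) (w : Int) :
    pvAltGo w (c :: rest) = (w + 1) :: pvMidGo (w + 1) rest := by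
  rw [pvAltGo, if_neg (by simpa [PySem.Str.strIsspace] using hc)]
  simp only [pvMidGo, List.replicate_succ, List.cons_append]

theorem pvMidGo_cons_space (c : String) (hc : PySem.Str.strIsspace c = true)
    (rest : List String) (w : Int) :
    pvMidGo w (c :: rest) = -1 :: pvAltGo w rest := by
  unfold pvMidGo
  rw [List.takeWhile_cons_of_neg (by simpa [PySem.Str.strIsspace] using hc),
      List.dropWhile_cons_of_neg (by simpa [PySem.Str.strIsspace] using hc)]
  simp [pvAltGo_cons_space c hc]

theorem pvMidGo_cons_word (c : String) (hc : PySem.Str.strIsspace c = false)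
    (rest : List String) (w : Int) :
    pvMidGo w (c :: rest) = w :: pvMidGo w rest := by
  unfold pvMidGo
  rw [List.takeWhile_cons_of_pos (by simpa [PySem.Str.strIsspace] using hc),
      List.dropWhile_cons_of_pos (by simpa [PySem.Str.strIsspace] using hc)]
  simp [List.replicate_succ]

-- the loop invariant: A's fold from either flag state equals acc ++ the matching B continuation
theorem pv_main (letters : List String) :
    ∀ (acc : List Int) (w : Int),
      ((letters.foldl
        (fun (st : List Int × Int × Bool) character =>
          if PySem.Str.strIsspace character then
            (st.1 ++ [-1], st.2.1, false)
          else if !st.2.2 then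
            (st.1 ++ [st.2.1 + 1], st.2.1 + 1, true)
          else
            (st.1 ++ [st.2.1], st.2.1, true))
        (acc, w, false)).1 = acc ++ pvAltGo w letters)
      ∧ ((letters.foldl
        (fun (st : List Int × Int × Bool) character =>
          if PySem.Str.strIsspace character then
            (st.1 ++ [-1], st.2.1, false)
          else if !st.2.2 then
            (st.1 ++ [st.2.1 + 1], st.2.1 + 1, true)
          else
            (st.1 ++ [st.2.1], st.2.1, true))
        (acc, w, true)).1 = acc ++ pvMidGo w letters) := by
  induction letters with
  | nil => intro acc w; simp [pvAltGo, pvMidGo]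
  | cons c rest ih =>
    intro acc w
    by_cases hc : PySem.Str.strIsspace c = true
    · constructor
      · simp only [List.foldl_cons, hc, if_pos]
        rw [(ih (acc ++ [-1]) w).1, pvAltGo_cons_space c hc]
        simp
      · simp only [List.foldl_cons, hc, if_pos]
        rw [(ih (acc ++ [-1]) w).1, pvMidGo_cons_space c hc]
        simp
    · simp only [Bool.not_eq_true] at hc
      constructor
      · simp only [List.foldl_cons, hc, Bool.false_eq_true, if_false, Bool.not_false, if_pos]
        rw [(ih (acc ++ [w + 1]) (w + 1)).2, pvAltGo_cons_word c hc]
        simp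
      · simp only [List.foldl_cons, hc, Bool.false_eq_true, if_false, Bool.not_true]
        rw [(ih (acc ++ [w]) w).2, pvMidGo_cons_word c hc]
        simp

-- ===== VERDICT (by name: the statement is the Claim_ definition above) =====
theorem compute_sentence_word_indices_spec : Claim_equal_compute_sentence_word_indices := by
  intro letters _
  unfold Spec_compute_sentence_word_indices compute_sentence_word_indices compute_sentence_word_indices_alt
  simpa using (pv_main letters [] (-1)).1
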